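-- pv_equiv track=rewrite | github.com/Ulthran/pycov3 | src/pycov3/App.py | calculate_mapl
-- ===== SOURCE A (Python) =====
-- def calculate_mapl(cigar: str) -> int:
--     operations = []
--     current_length = ""
--
--     if cigar == "*":
--         return -1
--
--     for char in cigar:
--         if char.isdigit():
--             current_length += char
--         else:
--             operations.append((int(current_length), char))
--             current_length = ""
--
--     return sum([n for n, c in operations if c == "M" or c == "D"]) - sum(
--         [n for n, c in operations if c == "I"]
--     )
-- ===== SOURCE B (Python) =====
-- def calculate_mapl(cigar: str) -> int:
--     if cigar == "*":
--         return -1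
--
--     total = 0
--     current_length = ""
--     for char in cigar:
--         if char.isdigit():
--             current_length += char
--         else:
--             n = int(current_length)
--             if char == "M" or char == "D":
--                 total += n
--             elif char == "I":
--                 total -= n
--             current_length = ""
--     return total
-- ===== Notes on version B (the rewrite author's own statement) =====
-- stated objective: simpler
-- what changed: B makes one pass accumulating the signed total directly, instead of building an operations list and scanning it twice with filtering comprehensions.
import Mathlib
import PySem

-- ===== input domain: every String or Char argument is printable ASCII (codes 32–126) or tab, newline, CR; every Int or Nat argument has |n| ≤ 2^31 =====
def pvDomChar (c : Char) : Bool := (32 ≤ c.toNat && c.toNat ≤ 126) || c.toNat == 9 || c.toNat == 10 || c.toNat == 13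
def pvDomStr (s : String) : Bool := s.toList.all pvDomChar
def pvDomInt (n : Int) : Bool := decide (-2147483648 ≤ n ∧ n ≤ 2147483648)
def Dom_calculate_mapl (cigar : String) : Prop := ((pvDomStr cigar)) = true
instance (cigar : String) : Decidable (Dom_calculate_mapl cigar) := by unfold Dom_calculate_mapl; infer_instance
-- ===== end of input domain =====

-- B merges A's list-building pass and its two filtering comprehensions into one pass
-- that accumulates the signed total directly (objective: simpler; return value only).

-- ===== PORT A =====
-- for char in cigar: build (operations, current_length); int of an empty digit run raises → those inputs are outside Pre_
def pvStepA (acc : List (Int × Char) × List Char) (ch : Char) : List (Int × Char) × List Char :=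
  if PySem.Chars.isdigit ch then (acc.1, acc.2 ++ [ch])
  else (acc.1 ++ [((PySem.Int.ofChars? acc.2).getD 0, ch)], [])

def calculate_mapl (cigar : String) : Int :=
  if cigar = "*" then -1
  else
    let st := cigar.toList.foldl pvStepA ([], [])
    ((st.1.filter (fun p => p.2 = 'M' ∨ p.2 = 'D')).map (fun p => p.1)).sum
      - ((st.1.filter (fun p => p.2 = 'I')).map (fun p => p.1)).sum

-- ===== PORT B =====
-- one pass: (total, current_length); int of an empty digit run raises in Python → .getD 0 is only reached outside Pre_
def pvStepB (acc : Int × List Char) (ch : Char) : Int × List Char :=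
  if PySem.Chars.isdigit ch then (acc.1, acc.2 ++ [ch])
  else
    let n := (PySem.Int.ofChars? acc.2).getD 0
    (if ch = 'M' ∨ ch = 'D' then acc.1 + n else if ch = 'I' then acc.1 - n else acc.1, [])

def calculate_mapl_alt (cigar : String) : Int :=
  if cigar = "*" then -1
  else (cigar.toList.foldl pvStepB (0, [])).1

-- ===== PRECONDITION & SPEC =====
-- Pre_ excludes exactly the inputs where Python raises ValueError (int of an empty digit run) in BOTH programs:
-- a non-digit character at position 0 or right after another non-digit.
def Pre_calculate_mapl (cigar : String) : Prop :=
  cigar = "*" ∨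
    ∀ i < cigar.toList.length,
      PySem.Chars.isdigit (cigar.toList.getD i '0') = false →
        0 < i ∧ PySem.Chars.isdigit (cigar.toList.getD (i - 1) '0') = true
instance (cigar : String) : Decidable (Pre_calculate_mapl cigar) := by
  unfold Pre_calculate_mapl; infer_instance

def pvWitness_calculate_mapl : String := "10M2I3D"

def Spec_calculate_mapl (cigar : String) (out : Int) : Prop := out = calculate_mapl_alt cigar
instance (cigar : String) (out : Int) : Decidable (Spec_calculate_mapl cigar out) := by unfold Spec_calculate_mapl; infer_instance

-- ===== CLAIM (what is proved, stated in full; the proofs are below) =====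
def Claim_equal_calculate_mapl : Prop := ∀ (cigar : String), Dom_calculate_mapl cigar → Pre_calculate_mapl cigar → Spec_calculate_mapl cigar (calculate_mapl cigar)

-- ===== LEMMAS AND PROOFS =====

/-- A's final double-comprehension value of an operations list. -/
def pvG (ops : List (Int × Char)) : Int :=
  ((ops.filter (fun p => p.2 = 'M' ∨ p.2 = 'D')).map (fun p => p.1)).sum
    - ((ops.filter (fun p => p.2 = 'I')).map (fun p => p.1)).sum

theorem pvG_append (ops : List (Int × Char)) (n : Int) (c : Char) :
    pvG (ops ++ [(n, c)]) =
      (if c = 'M' ∨ c = 'D' then pvG ops + n else if c = 'I' then pvG ops - n else pvG ops) := by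
  have hni : (c = 'M' ∨ c = 'D') → ¬ c = 'I' := by rintro (rfl | rfl) h <;> simp_all
  simp only [pvG, List.filter_append, List.map_append, List.sum_append]
  by_cases h1 : c = 'M' ∨ c = 'D'
  · simp [h1, hni h1]; ring
  · by_cases h2 : c = 'I' <;> simp [h1, h2] <;> ring

/-- The one-pass fold computes pvG of the list-building fold, in lockstep. -/
theorem pv_fold_eq (l : List Char) (ops : List (Int × Char)) (cur : List Char) :
    l.foldl pvStepB (pvG ops, cur) =
      ((pvG (l.foldl pvStepA (ops, cur)).1), (l.foldl pvStepA (ops, cur)).2) := by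
  induction l generalizing ops cur with
  | nil => simp
  | cons ch l ih =>
    by_cases hd : PySem.Chars.isdigit ch
    · simp only [List.foldl_cons, pvStepA, pvStepB, hd, if_true]
      exact ih ops (cur ++ [ch])
    · simp only [List.foldl_cons, pvStepA, pvStepB, hd]
      rw [show (if ch = 'M' ∨ ch = 'D' then pvG ops + (PySem.Int.ofChars? cur).getD 0
            else if ch = 'I' then pvG ops - (PySem.Int.ofChars? cur).getD 0 else pvG ops)
          = pvG (ops ++ [((PySem.Int.ofChars? cur).getD 0, ch)]) from (pvG_append ..).symm]
      exact ih _ []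

-- ===== VERDICT (by name: the statement is the Claim_ definition above) =====
theorem calculate_mapl_spec : Claim_equal_calculate_mapl := by
  intro cigar _ _
  unfold Spec_calculate_mapl calculate_mapl calculate_mapl_alt
  by_cases h : cigar = "*"
  · simp [h]
  · simp only [h, if_false]
    have := pv_fold_eq cigar.toList [] []
    simp only [show pvG [] = 0 from rfl] at this
    rw [this]
    rfl
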